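-- pv_equiv track=rewrite | github.com/Divyansh-Sharma-81/innov8 | backend/services/snapshots/service.py | _detect_nested_loops
-- ===== SOURCE A (Python) =====
-- from typing import Any, Awaitable, Callable, Dict, Iterable, List, Optional, Tuple
--
-- def _detect_nested_loops(source: str) -> bool:
--     loop_stack: List[int] = []
--     for line in source.splitlines():
--         if not line.strip() or line.lstrip().startswith("#"):
--             continue
--         indent = len(line) - len(line.lstrip(" "))
--         stripped = line.strip()
--         while loop_stack and indent <= loop_stack[-1]:
--             loop_stack.pop()
--         if stripped.startswith(("for ", "while ")):
--             if loop_stack: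
--                 return True
--             loop_stack.append(indent)
--     return False
-- ===== SOURCE B (Python) =====
-- def _has_inner_loop(rows, d):
--     # rows = (indent, is_loop_header) of the meaningful lines after a loop header
--     # with indent d: an inner loop exists iff a header appears before the indent
--     # drops back to <= d.
--     for dj, lj in rows:
--         if dj <= d:
--             return False
--         if lj:
--             return True
--     return False
--
-- def _detect_nested_loops(source: str) -> bool:
--     # Stage 1: tabulate (indent, is_loop_header) for every meaningful line.
--     rows = []
--     for line in source.splitlines():
--         if not line.strip() or line.lstrip().startswith("#"):
--             continue
--         rows.append((len(line) - len(line.lstrip(" ")),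
--                      line.strip().startswith(("for ", "while "))))
--     # Stage 2: for each loop header, look ahead for another header that occurs
--     # before the indentation falls back to the header's level.
--     for i, (d, is_loop) in enumerate(rows):
--         if is_loop and _has_inner_loop(rows[i + 1:], d):
--             return True
--     return False
-- ===== Notes on version B (the rewrite author's own statement) =====
-- stated objective: alternative
-- what changed: Replaces A's single stateful pass with an indent stack by a two-stage pairwise-lookahead algorithm: first tabulate (indent, is_loop_header) per meaningful line, then for each loop header scan ahead for another header occurring before the indent drops back to its level.
import Mathlib
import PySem

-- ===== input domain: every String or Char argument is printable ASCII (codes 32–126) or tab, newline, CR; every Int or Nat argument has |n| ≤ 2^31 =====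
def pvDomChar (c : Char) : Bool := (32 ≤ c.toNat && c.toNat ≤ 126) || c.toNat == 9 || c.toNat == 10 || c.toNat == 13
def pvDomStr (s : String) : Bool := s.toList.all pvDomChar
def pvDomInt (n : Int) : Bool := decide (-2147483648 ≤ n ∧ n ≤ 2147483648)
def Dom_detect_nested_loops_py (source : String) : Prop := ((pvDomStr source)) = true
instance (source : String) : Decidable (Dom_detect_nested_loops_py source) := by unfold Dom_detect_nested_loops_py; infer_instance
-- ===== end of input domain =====

-- B replaces A's stateful indent-stack pass by a two-stage pairwise-lookahead algorithm; alternative structure, same result.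

-- ===== PORT A =====
-- shared line predicates: skip blank / comment-only lines; indent = count of leading ' '
def pvSkipLine (line : List Char) : Bool :=
  (PySem.Chars.strip line).isEmpty || PySem.Chars.startswith (PySem.Chars.lstrip line) ['#']

def pvIndent (line : List Char) : Int := (line.takeWhile (· == ' ')).length

def pvIsLoopHeader (stripped : List Char) : Bool :=
  PySem.Chars.startswith stripped "for ".toList || PySem.Chars.startswith stripped "while ".toList

-- while loop_stack and indent <= loop_stack[-1]: loop_stack.pop()   (top of stack at the END of the list, as in Python)
def pvPopLoop (stack : List Int) (indent : Int) : List Int :=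
  match h : stack.getLast? with
  | none => stack
  | some top =>
    if indent ≤ top then
      pvPopLoop stack.dropLast indent
    else stack
termination_by stack.length
decreasing_by
  have hne : stack ≠ [] := by intro hnil; simp [hnil] at h
  have hlen : stack.dropLast.length = stack.length - 1 := List.length_dropLast
  have hpos : 0 < stack.length := List.length_pos_iff.mpr hne
  omega

def pvDetectA : List (List Char) → List Int → Bool
  | [], _ => false
  | line :: rest, stack =>
    if pvSkipLine line then pvDetectA rest stack
    else
      let indent := pvIndent line
      let stripped := PySem.Chars.strip line
      let stack' := pvPopLoop stack indent
      if pvIsLoopHeader stripped then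
        if stack' ≠ [] then true
        else pvDetectA rest (stack' ++ [indent])
      else pvDetectA rest stack'

def detect_nested_loops_py (source : String) : Bool :=
  pvDetectA (PySem.Chars.splitlines source.toList) []

-- ===== PORT B =====
-- stage 1: tabulate (indent, is_loop_header) for every meaningful line
def pvRows : List (List Char) → List (Int × Bool)
  | [] => []
  | line :: rest =>
    if pvSkipLine line then pvRows rest
    else (pvIndent line, pvIsLoopHeader (PySem.Chars.strip line)) :: pvRows rest

-- _has_inner_loop(rows, d): a header appears before the indent drops back to <= d
def pvHasInner : List (Int × Bool) → Int → Bool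
  | [], _ => false
  | (dj, lj) :: rest, d =>
    if dj ≤ d then false
    else if lj then true
    else pvHasInner rest d

-- stage 2: for each loop header row, look ahead in the remaining rows (= rows[i+1:])
def pvOuter : List (Int × Bool) → Bool
  | [] => false
  | (d, isl) :: rest =>
    if isl && pvHasInner rest d then true else pvOuter rest

def detect_nested_loops_py_alt (source : String) : Bool :=
  pvOuter (pvRows (PySem.Chars.splitlines source.toList))

-- ===== PRECONDITION & SPEC =====
def Spec_detect_nested_loops_py (source : String) (out : Bool) : Prop := out = detect_nested_loops_py_alt source
instance (source : String) (out : Bool) : Decidable (Spec_detect_nested_loops_py source out) := by unfold Spec_detect_nested_loops_py; infer_instance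

-- ===== CLAIM (what is proved, stated in full; the proofs are below) =====
def Claim_equal_detect_nested_loops_py : Prop := ∀ (source : String), Dom_detect_nested_loops_py source → Spec_detect_nested_loops_py source (detect_nested_loops_py source)

-- ===== LEMMAS AND PROOFS =====

-- proof-only intermediate: the single scan over the tabulated rows with the pending loop indent
def pvScan : List (Int × Bool) → Option Int → Bool
  | [], _ => false
  | (d, isl) :: rest, cur =>
    let cur' : Option Int :=
      match cur with
      | some i => if d ≤ i then none else some i
      | none => none
    if isl then
      match cur' with
      | some _ => true
      | none => pvScan rest (some d)
    else pvScan rest cur'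

def pvRepr : Option Int → List Int
  | none => []
  | some i => [i]

theorem pvPopLoop_nil (indent : Int) : pvPopLoop [] indent = [] := by
  unfold pvPopLoop; simp

theorem pvPopLoop_single (i indent : Int) :
    pvPopLoop [i] indent = if indent ≤ i then [] else [i] := by
  unfold pvPopLoop
  by_cases h : indent ≤ i <;> simp [h, pvPopLoop_nil]

-- A equals the single scan over the rows table
theorem pvDetectA_eq_scan (lines : List (List Char)) (cur : Option Int) :
    pvDetectA lines (pvRepr cur) = pvScan (pvRows lines) cur := by
  induction lines generalizing cur with
  | nil => simp [pvDetectA, pvRows, pvScan]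
  | cons line rest ih =>
    simp only [pvDetectA, pvRows]
    by_cases hs : pvSkipLine line
    · simp [hs, ih]
    · simp only [hs, if_false]
      cases cur with
      | none =>
        simp only [pvRepr, pvPopLoop_nil]
        by_cases hl : pvIsLoopHeader (PySem.Chars.strip line)
        · simpa [pvScan, hl, pvRepr] using ih (some (pvIndent line))
        · simpa [pvScan, hl, pvRepr] using ih none
      | some i =>
        simp only [pvRepr, pvPopLoop_single]
        by_cases hle : pvIndent line ≤ i
        · by_cases hl : pvIsLoopHeader (PySem.Chars.strip line)
          · simpa [pvScan, hle, hl, pvRepr] using ih (some (pvIndent line))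
          · simpa [pvScan, hle, hl, pvRepr] using ih none
        · by_cases hl : pvIsLoopHeader (PySem.Chars.strip line)
          · simp [pvScan, hle, hl]
          · simpa [pvScan, hle, hl, pvRepr] using ih (some i)

-- the single scan equals the pairwise lookahead form
theorem pvScan_eq (rows : List (Int × Bool)) :
    pvScan rows none = pvOuter rows ∧
    ∀ d : Int, pvScan rows (some d) = (pvHasInner rows d || pvOuter rows) := by
  induction rows with
  | nil => simp [pvScan, pvOuter, pvHasInner]
  | cons row rest ih =>
    obtain ⟨d0, isl⟩ := row
    obtain ⟨ih0, ih1⟩ := ih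
    constructor
    · by_cases hl : isl
      · simp [pvScan, pvOuter, hl, ih1 d0]
      · simp [pvScan, pvOuter, hl, ih0]
    · intro d
      by_cases hle : d0 ≤ d
      · by_cases hl : isl
        · simp [pvScan, pvOuter, pvHasInner, hle, hl, ih1 d0]
        · simp [pvScan, pvOuter, pvHasInner, hle, hl, ih0]
      · by_cases hl : isl
        · simp [pvScan, pvOuter, pvHasInner, hle, hl]
        · simp [pvScan, pvOuter, pvHasInner, hle, hl, ih1 d]

-- ===== VERDICT (by name: the statement is the Claim_ definition above) =====
theorem detect_nested_loops_py_spec : Claim_equal_detect_nested_loops_py := by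
  intro source _
  unfold Spec_detect_nested_loops_py detect_nested_loops_py detect_nested_loops_py_alt
  calc pvDetectA (PySem.Chars.splitlines source.toList) []
      = pvScan (pvRows (PySem.Chars.splitlines source.toList)) none :=
        pvDetectA_eq_scan _ none
    _ = pvOuter (pvRows (PySem.Chars.splitlines source.toList)) :=
        (pvScan_eq _).1
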